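-- pv_equiv track=rewrite | github.com/incubateur-ademe/quefairedemesobjets | dags/sources/tasks/transform/opening_hours.py | merge_consecutive_tuples
-- ===== SOURCE A (Python) =====
-- from typing import Any, Dict, List, Tuple
--
-- def merge_consecutive_tuples(tuples: list[tuple[Any, Any]]) -> list[tuple[Any, Any]]:
--     result = []
--     if tuples:
--         current_start, current_end = tuples[0]
--         for next_start, next_end in tuples[1:]:
--             if current_end == next_start:
--                 current_end = next_end
--             else:
--                 result.append((current_start, current_end))
--                 current_start, current_end = next_start, next_end
--         result.append((current_start, current_end))
--     return result
-- ===== SOURCE B (Python) =====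
-- def merge_consecutive_tuples(tuples):
--     # Build the merged list BACK-TO-FRONT: walk the input in reverse and merge
--     # each tuple into the head of the result when its end meets that head's start.
--     result = []
--     for start, end in reversed(tuples):
--         if result and end == result[0][0]:
--             result[0] = (start, result[0][1])
--         else:
--             result.insert(0, (start, end))
--     return result
-- ===== Notes on version B (the rewrite author's own statement) =====
-- stated objective: alternative
-- what changed: Builds the merged list back-to-front: iterates the input in reverse and merges each tuple into the HEAD of the result, instead of A's forward pass holding a current_start/current_end accumulator with a final flush.
import Mathlib
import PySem

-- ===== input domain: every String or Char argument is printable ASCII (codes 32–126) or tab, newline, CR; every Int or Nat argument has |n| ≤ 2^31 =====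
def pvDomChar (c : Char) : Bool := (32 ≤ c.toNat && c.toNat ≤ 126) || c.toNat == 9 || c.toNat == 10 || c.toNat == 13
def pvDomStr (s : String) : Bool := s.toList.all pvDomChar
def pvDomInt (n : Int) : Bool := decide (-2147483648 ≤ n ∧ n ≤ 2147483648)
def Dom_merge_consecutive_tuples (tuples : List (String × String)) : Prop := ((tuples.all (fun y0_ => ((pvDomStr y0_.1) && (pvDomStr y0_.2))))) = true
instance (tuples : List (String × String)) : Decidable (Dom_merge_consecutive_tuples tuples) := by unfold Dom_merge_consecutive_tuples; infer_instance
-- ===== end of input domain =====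

-- B builds the merged list back-to-front (reverse pass, merging into the head of the result)
-- instead of A's forward pass with a held current_start/current_end accumulator; alternative decomposition.


-- ===== PORT A =====
-- state: (result, current_start, current_end)
def pvAStep (acc : List (String × String) × String × String) (p : String × String) :
    List (String × String) × String × String :=
  if acc.2.2 == p.1 then (acc.1, acc.2.1, p.2)
  else (acc.1 ++ [(acc.2.1, acc.2.2)], p.1, p.2)

def merge_consecutive_tuples (tuples : List (String × String)) : List (String × String) :=
  match tuples with
  | [] => []
  | (s, e) :: rest =>
    let fin := rest.foldl pvAStep ([], s, e)
    fin.1 ++ [(fin.2.1, fin.2.2)]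

-- ===== PORT B =====
-- one reverse-iteration step: if result and end == result[0][0], rewrite result[0]; else insert at 0
def pvBStep (res : List (String × String)) (p : String × String) : List (String × String) :=
  match res with
  | (a, b) :: tl => if p.2 == a then (p.1, b) :: tl else p :: (a, b) :: tl
  | [] => [p]

def merge_consecutive_tuples_alt (tuples : List (String × String)) : List (String × String) :=
  tuples.reverse.foldl pvBStep []

-- ===== PRECONDITION & SPEC =====
def Spec_merge_consecutive_tuples (tuples : List (String × String)) (out : List (String × String)) : Prop := out = merge_consecutive_tuples_alt tuples
instance (tuples : List (String × String)) (out : List (String × String)) : Decidable (Spec_merge_consecutive_tuples tuples out) := by unfold Spec_merge_consecutive_tuples; infer_instance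

-- ===== CLAIM (what is proved, stated in full; the proofs are below) =====
def Claim_equal_merge_consecutive_tuples : Prop := ∀ (tuples : List (String × String)), Dom_merge_consecutive_tuples tuples → Spec_merge_consecutive_tuples tuples (merge_consecutive_tuples tuples)

-- ===== LEMMAS AND PROOFS =====

-- B as a right fold: reverse-then-foldl is foldr
theorem pvB_foldr (tuples : List (String × String)) :
    merge_consecutive_tuples_alt tuples = tuples.foldr (fun p r => pvBStep r p) [] := by
  unfold merge_consecutive_tuples_alt
  rw [List.foldl_reverse]

-- merging (cs,ce) then p-collapse commute when ce = s'
theorem pvB_merge_merge (cs ce s' e' : String) (r : List (String × String)) (h : ce = s') :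
    pvBStep r (cs, e') = pvBStep (pvBStep r (s', e')) (cs, ce) := by
  cases r with
  | nil => simp [pvBStep, h]
  | cons q tl =>
    obtain ⟨a, b⟩ := q
    by_cases hb : e' = a
    · simp [pvBStep, hb, h]
    · simp [pvBStep, hb, h]

-- when ce ≠ head start, merging (cs,ce) just conses it
theorem pvB_no_merge (cs ce s' e' : String) (r : List (String × String)) (h : ¬ ce = s') :
    pvBStep (pvBStep r (s', e')) (cs, ce) = (cs, ce) :: pvBStep r (s', e') := by
  cases r with
  | nil => simp [pvBStep, h]
  | cons q tl =>
    obtain ⟨a, b⟩ := q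
    by_cases hb : e' = a
    · simp [pvBStep, hb, h]
    · simp [pvBStep, hb, h]

-- invariant: A's fold from state (res, cs, ce) produces res ++ (B's merge of (cs,ce) into B's result of rest)
theorem pv_inv (rest : List (String × String)) :
    ∀ (res : List (String × String)) (cs ce : String),
    (let fin := rest.foldl pvAStep (res, cs, ce); fin.1 ++ [(fin.2.1, fin.2.2)]) =
      res ++ pvBStep (rest.foldr (fun p r => pvBStep r p) []) (cs, ce) := by
  induction rest with
  | nil => intro res cs ce; simp [pvBStep]
  | cons p rest ih =>
    intro res cs ce
    obtain ⟨s', e'⟩ := p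
    simp only [List.foldl_cons, List.foldr_cons]
    by_cases h : ce = s'
    · have hstep : pvAStep (res, cs, ce) (s', e') = (res, cs, e') := by
        simp [pvAStep, h]
      rw [hstep, ih, ← pvB_merge_merge cs ce s' e' _ h]
    · have hstep : pvAStep (res, cs, ce) (s', e') = (res ++ [(cs, ce)], s', e') := by
        simp [pvAStep, h]
      rw [hstep, ih, pvB_no_merge cs ce s' e' _ h]
      simp

-- ===== VERDICT (by name: the statement is the Claim_ definition above) =====
theorem merge_consecutive_tuples_spec : Claim_equal_merge_consecutive_tuples := by
  intro tuples _
  unfold Spec_merge_consecutive_tuples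
  rw [pvB_foldr]
  match tuples with
  | [] => rfl
  | (s, e) :: rest =>
    show (let fin := rest.foldl pvAStep ([], s, e); fin.1 ++ [(fin.2.1, fin.2.2)]) = _
    rw [pv_inv rest [] s e]
    simp
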